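-- pv_equiv track=rewrite | github.com/grill-lab/OAT | dashboard/src/search_tab_helpers.py | get_reformulated_search
-- ===== SOURCE A (Python) =====
-- def get_reformulated_search(session_list):
--     total_searches = 0
--     new_searches = 0
--     for session in session_list:
--         for interaction in range(len(session) - 1):
--             intent = session[interaction].get('intent_pred')
--             if intent:
--                 if 'search' in intent[0]:
--                     total_searches += 1
--                     next_intent = session[interaction + 1].get('intent_pred')
--                     if next_intent:
--                         if 'search' in next_intent[0]:
--                             new_searches += 1
--     return new_searches, total_searches
-- ===== SOURCE B (Python) =====
-- def get_reformulated_search(session_list):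
--     new_searches = 0
--     total_searches = 0
--     for session in session_list:
--         run = 0  # length of the current run of consecutive search intents
--         for interaction in session:
--             intent = interaction.get('intent_pred')
--             if intent and 'search' in intent[0]:
--                 run += 1
--             else:
--                 if run:
--                     # a run of k searches ended strictly before the session end:
--                     # all k count towards totals, k-1 adjacent pairs
--                     new_searches += run - 1
--                     total_searches += run
--                 run = 0
--         if run:
--             # run reaching the session end: its last element is excluded from totals
--             new_searches += run - 1
--             total_searches += run - 1
--     return new_searches, total_searches
-- ===== Notes on version B (the rewrite author's own statement) =====
-- stated objective: alternative
-- what changed: Replaces A's indexed scan with a one-element lookahead (a second dict lookup at i+1 for every search hit) by run-length accumulation: B tracks only the length of the current run of consecutive search intents and, when a run ends, adds the closed forms run-1 (adjacent pairs) and run or run-1 (totals, depending on whether the run touches the session end) -- no lookahead, one dict lookup per interaction.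
import Mathlib
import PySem

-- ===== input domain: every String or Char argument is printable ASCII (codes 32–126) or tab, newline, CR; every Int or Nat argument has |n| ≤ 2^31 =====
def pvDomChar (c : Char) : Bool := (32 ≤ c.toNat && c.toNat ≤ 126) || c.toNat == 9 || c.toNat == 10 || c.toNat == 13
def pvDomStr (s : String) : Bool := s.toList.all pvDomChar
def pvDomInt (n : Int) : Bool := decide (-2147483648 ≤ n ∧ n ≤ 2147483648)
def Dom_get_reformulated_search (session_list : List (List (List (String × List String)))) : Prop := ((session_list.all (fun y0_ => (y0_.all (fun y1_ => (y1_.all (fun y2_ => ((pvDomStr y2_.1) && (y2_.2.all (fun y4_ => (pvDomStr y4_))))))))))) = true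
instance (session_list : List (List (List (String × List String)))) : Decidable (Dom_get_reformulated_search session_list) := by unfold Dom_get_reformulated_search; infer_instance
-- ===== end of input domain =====

-- B replaces A's indexed scan with lookahead by run-length accumulation: it tracks the
-- length of the current run of consecutive search intents and adds closed forms at run
-- boundaries (objective: alternative algorithm, no lookahead).

-- ===== PORT A =====
-- 'intent and "search" in intent[0]' as it appears in both sources
def pvIsSearchFlag (interaction : List (String × List String)) : Bool :=
  match (PySem.Dict.mk interaction).get? "intent_pred" with
  | some (s :: _) => PySem.Str.isIn "search" s
  | _ => false

-- the body of A's inner 'for interaction in range(len(session) - 1)' loop;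
-- state st = (total_searches, new_searches)
def pvBodyA (session : List (List (String × List String))) (st : Int × Int) (i : Int) : Int × Int :=
  match PySem.List.pyGet? session i with
  | none => st                                   -- unreachable: 0 ≤ i < len(session) - 1
  | some interaction =>
    match (PySem.Dict.mk interaction).get? "intent_pred" with   -- intent = session[interaction].get('intent_pred')
    | some (s :: _) =>                           -- 'if intent:' (truthy = nonempty list), intent[0] = s
      if PySem.Str.isIn "search" s then          -- 'search' in intent[0]
        let st' := (st.1 + 1, st.2)              -- total_searches += 1
        match PySem.List.pyGet? session (i + 1) with
        | none => st'                            -- unreachable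
        | some nxt =>
          match (PySem.Dict.mk nxt).get? "intent_pred" with
          | some (t :: _) =>
            if PySem.Str.isIn "search" t then (st'.1, st'.2 + 1) else st'   -- new_searches += 1
          | _ => st'
      else st
    | _ => st

def get_reformulated_search (session_list : List (List (List (String × List String)))) : Int × Int :=
  let st := session_list.foldl
    (fun st session =>
      (PySem.List.pyRange 0 ((session.length : Int) - 1) 1).foldl (pvBodyA session) st)
    ((0 : Int), (0 : Int))
  (st.2, st.1)

-- ===== PORT B =====
-- the body of B's inner 'for interaction in session' loop; state = (new_searches, total_searches, run)
def pvStepB (st : Int × Int × Int) (interaction : List (String × List String)) : Int × Int × Int :=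
  if pvIsSearchFlag interaction then (st.1, st.2.1, st.2.2 + 1)         -- run += 1
  else if st.2.2 ≠ 0 then (st.1 + st.2.2 - 1, st.2.1 + st.2.2, 0)       -- if run: new += run-1; total += run; run = 0
  else (st.1, st.2.1, 0)                                                -- run = 0

def get_reformulated_search_alt (session_list : List (List (List (String × List String)))) : Int × Int :=
  session_list.foldl
    (fun st session =>
      let inner := session.foldl pvStepB (st.1, st.2, 0)
      if inner.2.2 ≠ 0 then (inner.1 + inner.2.2 - 1, inner.2.1 + inner.2.2 - 1)   -- final: if run: new += run-1; total += run-1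
      else (inner.1, inner.2.1))
    ((0 : Int), (0 : Int))

-- ===== PRECONDITION & SPEC =====
def Spec_get_reformulated_search (session_list : List (List (List (String × List String)))) (out : Int × Int) : Prop := out = get_reformulated_search_alt session_list
instance (session_list : List (List (List (String × List String)))) (out : Int × Int) : Decidable (Spec_get_reformulated_search session_list out) := by unfold Spec_get_reformulated_search; infer_instance

-- ===== CLAIM (what is proved, stated in full; the proofs are below) =====
def Claim_equal_get_reformulated_search : Prop := ∀ (session_list : List (List (List (String × List String)))), Dom_get_reformulated_search session_list → Spec_get_reformulated_search session_list (get_reformulated_search session_list)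

-- ===== LEMMAS AND PROOFS =====

-- number of adjacent (true, true) pairs
def pvPairs : List Bool → Nat
  | [] => 0
  | [_] => 0
  | a :: b :: l => (if a && b then 1 else 0) + pvPairs (b :: l)

-- number of trues excluding the last position
def pvTdl (l : List Bool) : Nat := l.dropLast.count true

-- per-session counts
def pvT (session : List (List (String × List String))) : Int :=
  (pvTdl (session.map pvIsSearchFlag) : Nat)
def pvN (session : List (List (String × List String))) : Int :=
  (pvPairs (session.map pvIsSearchFlag) : Nat)

-- A's body at a Nat index, phrased with List.getElem?
def pvFA (session : List (List (String × List String))) (st : Int × Int) (k : Nat) : Int × Int :=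
  match session[k]? with
  | none => st
  | some x =>
    if pvIsSearchFlag x then
      match session[k+1]? with
      | none => (st.1 + 1, st.2)
      | some y => if pvIsSearchFlag y then (st.1 + 1, st.2 + 1) else (st.1 + 1, st.2)
    else st

lemma pvBodyA_natCast (session : List (List (String × List String))) (st : Int × Int) (k : Nat) :
    pvBodyA session st (k : Int) = pvFA session st k := by
  simp only [pvBodyA, pvFA, pvIsSearchFlag, PySem.List.pyGet?_natCast]
  have hc : ((k : Int) + 1) = ((k + 1 : Nat) : Int) := by push_cast; ring
  rw [hc, PySem.List.pyGet?_natCast]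
  rcases session[k]? with _ | x
  · rfl
  · rcases hx : (PySem.Dict.mk x).get? "intent_pred" with _ | (_ | ⟨s, r⟩)
    · simp [hx]
    · simp [hx]
    · simp only [hx]
      by_cases hs : PySem.Str.isIn "search" s = true
      · simp only [hs, if_pos]
        rcases session[k + 1]? with _ | y
        · rfl
        · rcases hy : (PySem.Dict.mk y).get? "intent_pred" with _ | (_ | ⟨t, r2⟩) <;>
            simp [hy]
      · rw [if_neg hs, if_neg hs]

lemma pvFA_cons (x : List (String × List String)) (l : List (List (String × List String)))
    (st : Int × Int) (k : Nat) : pvFA (x :: l) st (k + 1) = pvFA l st k := by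
  simp [pvFA]

lemma pvLoopNat (session : List (List (String × List String))) (st : Int × Int) :
    (List.range (session.length - 1)).foldl (pvFA session) st
      = (st.1 + pvT session, st.2 + pvN session) := by
  induction session generalizing st with
  | nil => simp [pvT, pvN, pvTdl, pvPairs]
  | cons x l ih =>
    cases l with
    | nil => simp [pvT, pvN, pvTdl, pvPairs]
    | cons y t =>
      have hlen : (x :: y :: t).length - 1 = (y :: t).length - 1 + 1 := by
        simp [List.length_cons]
      rw [hlen, List.range_succ_eq_map, List.foldl_cons, List.foldl_map]
      have hb : (fun (st : Int × Int) (k : Nat) => pvFA (x :: y :: t) st k.succ)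
          = fun st k => pvFA (y :: t) st k := by
        funext st k
        exact pvFA_cons x (y :: t) st k
      rw [hb, ih]
      have hT : pvT (x :: y :: t) = (if pvIsSearchFlag x then 1 else 0) + pvT (y :: t) := by
        simp only [pvT, pvTdl, List.map_cons, List.dropLast_cons₂, List.count_cons]
        by_cases hx : pvIsSearchFlag x = true <;> simp [hx] <;> ring
      have hN : pvN (x :: y :: t)
          = (if pvIsSearchFlag x && pvIsSearchFlag y then 1 else 0) + pvN (y :: t) := by
        simp only [pvN, List.map_cons, pvPairs]
        by_cases hx : pvIsSearchFlag x = true <;> by_cases hy : pvIsSearchFlag y = true <;>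
          simp [hx, hy] <;> ring
      have h0 : pvFA (x :: y :: t) st 0
          = (st.1 + (if pvIsSearchFlag x then 1 else 0),
             st.2 + (if pvIsSearchFlag x && pvIsSearchFlag y then 1 else 0)) := by
        by_cases hx : pvIsSearchFlag x = true <;> by_cases hy : pvIsSearchFlag y = true <;>
          simp [pvFA, hx, hy]
      rw [h0, hT, hN]
      simp only [Prod.mk.injEq]
      exact ⟨by ring, by ring⟩

lemma pvLoopA (session : List (List (String × List String))) (st : Int × Int) :
    (PySem.List.pyRange 0 ((session.length : Int) - 1) 1).foldl (pvBodyA session) st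
      = (st.1 + pvT session, st.2 + pvN session) := by
  rw [PySem.List.pyRange_one, List.foldl_map]
  have hn : (((session.length : Int) - 1) - 0).toNat = session.length - 1 := by omega
  rw [hn]
  have hb : (fun (st : Int × Int) (k : Nat) => pvBodyA session st (0 + (k : Int)))
      = fun st k => pvFA session st k := by
    funext st k
    rw [zero_add, pvBodyA_natCast]
  rw [hb, pvLoopNat]

-- pvStepB seen through the flag of the interaction
def pvBStep (st : Int × Int × Int) (f : Bool) : Int × Int × Int :=
  if f then (st.1, st.2.1, st.2.2 + 1)
  else if st.2.2 ≠ 0 then (st.1 + st.2.2 - 1, st.2.1 + st.2.2, 0)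
  else (st.1, st.2.1, 0)

-- replicate run absorbed into a leading true
lemma pvRep_true (r : Nat) (fs : List Bool) :
    List.replicate r true ++ true :: fs = List.replicate (r + 1) true ++ fs := by
  rw [List.replicate_succ' (n := r)]
  simp [List.append_assoc]

lemma pvPairs_false_cons (fs : List Bool) : pvPairs (false :: fs) = pvPairs fs := by
  cases fs with
  | nil => rfl
  | cons b l => simp [pvPairs]

lemma pvPairs_rep (r : Nat) : pvPairs (List.replicate r true) = r - 1 := by
  induction r with
  | zero => rfl
  | succ r ih =>
    cases r with
    | zero => rfl
    | succ r' =>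
      rw [List.replicate_succ]
      have : pvPairs (true :: List.replicate (r' + 1) true)
          = 1 + pvPairs (List.replicate (r' + 1) true) := by
        rw [List.replicate_succ]
        simp [pvPairs]
      rw [this, ih]
      omega

lemma pvPairs_rep_false (r : Nat) (fs : List Bool) :
    pvPairs (List.replicate r true ++ false :: fs) = (r - 1) + pvPairs fs := by
  induction r with
  | zero => simp [pvPairs_false_cons]
  | succ r ih =>
    cases r with
    | zero => simp [pvPairs, pvPairs_false_cons]
    | succ r' =>
      rw [List.replicate_succ, List.cons_append]
      have h1 : pvPairs (true :: (List.replicate (r' + 1) true ++ false :: fs))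
          = 1 + pvPairs (List.replicate (r' + 1) true ++ false :: fs) := by
        rw [List.replicate_succ, List.cons_append]
        simp [pvPairs]
      rw [h1, ih]
      omega

lemma pvTdl_false_cons (fs : List Bool) : pvTdl (false :: fs) = pvTdl fs := by
  cases fs with
  | nil => rfl
  | cons b l => simp [pvTdl, List.dropLast_cons₂]

lemma pvTdl_rep (r : Nat) : pvTdl (List.replicate r true) = r - 1 := by
  cases r with
  | zero => rfl
  | succ r' =>
    simp [pvTdl, List.replicate_succ' (n := r')]

lemma pvTdl_rep_false (r : Nat) (fs : List Bool) :
    pvTdl (List.replicate r true ++ false :: fs) = r + pvTdl fs := by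
  have h : (List.replicate r true ++ false :: fs).dropLast
      = List.replicate r true ++ (false :: fs).dropLast := by
    rw [List.dropLast_append_of_ne_nil]
    simp
  simp only [pvTdl, h, List.count_append, List.count_replicate]
  rw [← pvTdl, ← pvTdl, pvTdl_false_cons]
  simp

-- the key invariant of B's run-length fold
lemma pvFoldB (fs : List Bool) : ∀ (n t : Int) (r : Nat),
    (let inner := fs.foldl pvBStep (n, t, (r : Int))
     if inner.2.2 ≠ 0 then (inner.1 + inner.2.2 - 1, inner.2.1 + inner.2.2 - 1)
     else (inner.1, inner.2.1))
      = (n + (pvPairs (List.replicate r true ++ fs) : Nat),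
         t + (pvTdl (List.replicate r true ++ fs) : Nat)) := by
  induction fs with
  | nil =>
    intro n t r
    cases r with
    | zero => simp [pvPairs, pvTdl]
    | succ r' =>
      have hne : ((r' + 1 : Nat) : Int) ≠ 0 := by positivity
      simp only [List.foldl_nil, List.append_nil, hne, if_true, ne_eq, not_false_iff,
        pvPairs_rep, pvTdl_rep]
      simp only [Nat.add_sub_cancel, Prod.mk.injEq]
      constructor <;> push_cast <;> ring
  | cons f fs ih =>
    intro n t r
    cases f with
    | true =>
      have hstep : pvBStep (n, t, (r : Int)) true = (n, t, ((r + 1 : Nat) : Int)) := by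
        simp [pvBStep]
      rw [List.foldl_cons, hstep, ih n t (r + 1), pvRep_true]
    | false =>
      cases r with
      | zero =>
        have hstep : pvBStep (n, t, ((0 : Nat) : Int)) false = (n, t, ((0 : Nat) : Int)) := by
          simp [pvBStep]
        rw [List.foldl_cons, hstep, ih n t 0]
        simp [pvPairs_false_cons, pvTdl_false_cons]
      | succ r' =>
        have hne : ((r' + 1 : Nat) : Int) ≠ 0 := by positivity
        have hstep : pvBStep (n, t, ((r' + 1 : Nat) : Int)) false
            = (n + ((r' + 1 : Nat) : Int) - 1, t + ((r' + 1 : Nat) : Int), ((0 : Nat) : Int)) := by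
          have hne' : ((r' : Int) + 1) ≠ 0 := by positivity
          simp [pvBStep, hne']
        rw [List.foldl_cons, hstep, ih _ _ 0]
        simp only [List.replicate_zero, List.nil_append, pvPairs_rep_false, pvTdl_rep_false,
          Prod.mk.injEq]
        constructor <;> push_cast <;> ring_nf

lemma pvSessionB (session : List (List (String × List String))) (st : Int × Int) :
    (let inner := session.foldl pvStepB (st.1, st.2, 0)
     if inner.2.2 ≠ 0 then (inner.1 + inner.2.2 - 1, inner.2.1 + inner.2.2 - 1)
     else (inner.1, inner.2.1))
      = (st.1 + pvN session, st.2 + pvT session) := by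
  have hmap : session.foldl pvStepB (st.1, st.2, 0)
      = (session.map pvIsSearchFlag).foldl pvBStep (st.1, st.2, 0) := by
    rw [List.foldl_map]
    rfl
  simp only [hmap]
  have := pvFoldB (session.map pvIsSearchFlag) st.1 st.2 0
  simp only [List.replicate_zero, List.nil_append, Nat.cast_zero] at this
  simpa [pvN, pvT] using this

-- ===== VERDICT (by name: the statement is the Claim_ definition above) =====
theorem get_reformulated_search_spec : Claim_equal_get_reformulated_search := by
  intro sl _
  unfold Spec_get_reformulated_search get_reformulated_search get_reformulated_search_alt
  have hA : (fun (st : Int × Int) (session : List (List (String × List String))) =>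
      (PySem.List.pyRange 0 ((session.length : Int) - 1) 1).foldl (pvBodyA session) st)
      = fun st session => (st.1 + pvT session, st.2 + pvN session) := by
    funext st session
    exact pvLoopA session st
  have hB : (fun (st : Int × Int) (session : List (List (String × List String))) =>
      let inner := session.foldl pvStepB (st.1, st.2, 0)
      if inner.2.2 ≠ 0 then (inner.1 + inner.2.2 - 1, inner.2.1 + inner.2.2 - 1)
      else (inner.1, inner.2.1))
      = fun st session => (st.1 + pvN session, st.2 + pvT session) := by
    funext st session
    exact pvSessionB session st
  rw [hA, hB]
  rw [PySem.List.foldl_prod_mk (f := fun a s => a + pvT s) (g := fun a s => a + pvN s),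
      PySem.List.foldl_prod_mk (f := fun a s => a + pvN s) (g := fun a s => a + pvT s)]
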